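-- pv_equiv track=rewrite | github.com/LorenzoGuideri/Algorithms-and-Data-Structures | es24_03.py | modulo_partition
-- ===== SOURCE A (Python) =====
-- def modulo_partition(A):
--     for i in range(len(A)):
--         ordered=True
--         for j in range(len(A)-1):
--             if A[j]%10>A[j+1]%10:
--                 A[j],A[j+1]=A[j+1],A[j]
--                 ordered=False
--         if ordered:
--             break
--     return A
-- ===== SOURCE B (Python) =====
-- def modulo_partition(A):
--     # Distribution (bucket) sort on the last-digit key: one filtering pass per
--     # bucket value 0..9, concatenated in ascending key order (stable by
--     # construction).  A[:] = ... keeps A's in-place mutation behaviour.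
--     A[:] = [x for k in range(10) for x in A if x % 10 == k]
--     return A
-- ===== Notes on version B (the rewrite author's own statement) =====
-- stated objective: faster
-- what changed: Replaces the quadratic bubble sort (repeated adjacent-swap passes on x%10) with a single-shot stable bucket distribution: concatenate, for k = 0..9 in order, the elements whose last digit is k.
import Mathlib
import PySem

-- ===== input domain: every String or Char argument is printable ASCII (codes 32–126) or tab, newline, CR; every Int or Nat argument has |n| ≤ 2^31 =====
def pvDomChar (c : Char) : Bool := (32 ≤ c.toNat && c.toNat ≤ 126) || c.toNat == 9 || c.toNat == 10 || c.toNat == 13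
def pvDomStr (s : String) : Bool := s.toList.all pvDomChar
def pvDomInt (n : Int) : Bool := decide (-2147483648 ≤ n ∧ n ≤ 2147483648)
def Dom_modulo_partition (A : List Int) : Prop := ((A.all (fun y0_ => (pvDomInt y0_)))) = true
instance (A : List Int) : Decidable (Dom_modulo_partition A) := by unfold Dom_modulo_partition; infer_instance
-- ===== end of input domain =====

-- B replaces A's quadratic bubble sort on the last-digit key by a linear stable bucket
-- distribution over the ten key values (objective: faster).  Both Pythons sort the list
-- IN PLACE and return it; the equivalence proved here is about the returned value.

-- ===== PORT A =====
-- inner 'for j' pass: one left-to-right sweep swapping adjacent out-of-order pairs;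
-- the Bool is A's 'ordered' flag (false iff some swap happened)
def bubblePass : List Int → List Int × Bool
  | a :: b :: t =>
    if PySem.Int.mod a 10 > PySem.Int.mod b 10 then
      (b :: (bubblePass (a :: t)).1, false)
    else
      (a :: (bubblePass (b :: t)).1, (bubblePass (b :: t)).2)
  | l => (l, true)
  termination_by l => l.length
  decreasing_by all_goals simp

-- outer 'for i in range(len(A))' loop with the early 'break'
def bubbleLoop : Nat → List Int → List Int
  | 0, l => l
  | n + 1, l =>
    let p := bubblePass l
    if p.2 then p.1 else bubbleLoop n p.1

def modulo_partition (A : List Int) : List Int := bubbleLoop A.length A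

-- ===== PORT B =====
def modulo_partition_alt (A : List Int) : List Int :=
  (PySem.List.pyRange 0 10 1).flatMap (fun k => A.filter (fun x => PySem.Int.mod x 10 == k))

-- ===== PRECONDITION & SPEC =====
def Spec_modulo_partition (A : List Int) (out : List Int) : Prop := out = modulo_partition_alt A
instance (A : List Int) (out : List Int) : Decidable (Spec_modulo_partition A out) := by unfold Spec_modulo_partition; infer_instance

-- ===== CLAIM (what is proved, stated in full; the proofs are below) =====
def Claim_equal_modulo_partition : Prop := ∀ (A : List Int), Dom_modulo_partition A → Spec_modulo_partition A (modulo_partition A)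

-- ===== LEMMAS AND PROOFS =====

-- a pass permutes the list
theorem bubblePass_perm (l : List Int) : (bubblePass l).1.Perm l := by
  fun_induction bubblePass l with
  | case1 a b t hgt ih => exact ((ih.cons b)).trans (List.Perm.swap a b t)
  | case2 a b t hgt ih => exact ih.cons a
  | case3 l h => simp

-- if the 'ordered' flag is true, the pass changed nothing
theorem bubblePass_of_true (l : List Int) (h : (bubblePass l).2 = true) :
    (bubblePass l).1 = l := by
  fun_induction bubblePass l with
  | case1 a b t hgt ih => simp at h
  | case2 a b t hgt ih => simp_all
  | case3 l h2 => rfl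

-- if the 'ordered' flag is true, the list is sorted by its last-digit key
theorem pairwise_of_true (l : List Int) (h : (bubblePass l).2 = true) :
    l.Pairwise (fun a b => PySem.Int.mod a 10 ≤ PySem.Int.mod b 10) := by
  fun_induction bubblePass l with
  | case1 a b t hgt ih => simp at h
  | case2 a b t hgt ih =>
    simp only at h
    have hbt := ih h
    push Not at hgt
    refine List.Pairwise.cons ?_ hbt
    intro x hx
    rcases List.mem_cons.mp hx with rfl | hx
    · exact hgt
    · exact le_trans hgt (List.rel_of_pairwise_cons hbt hx)
  | case3 l h2 =>
    rcases l with _ | ⟨a, _ | ⟨b, t⟩⟩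
    · simp
    · simp
    · exact (h2 a b t rfl).elim

-- stability: a pass never reorders elements with the same key
theorem bubblePass_filter (l : List Int) (k : Int) :
    (bubblePass l).1.filter (fun x => PySem.Int.mod x 10 == k)
      = l.filter (fun x => PySem.Int.mod x 10 == k) := by
  fun_induction bubblePass l with
  | case1 a b t hgt ih =>
    simp only [List.filter_cons, ih]
    have h10 : (0:Int) < 10 := by norm_num
    rw [PySem.Int.mod_eq_emod_of_pos h10, PySem.Int.mod_eq_emod_of_pos h10] at hgt
    by_cases hb : b % 10 = k
    · have ha : ¬ a % 10 = k := by omega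
      simp [ha, hb]
    · by_cases ha : a % 10 = k
      · simp [ha, hb]
      · simp [ha, hb]
  | case2 a b t hgt ih =>
    simp only [List.filter_cons, ih]
  | case3 l h2 => rfl

-- a pass on a nonempty list ends with a maximal-key element
theorem bubblePass_max (a : Int) (t : List Int) :
    ∃ ys b, (bubblePass (a :: t)).1 = ys ++ [b] ∧
      (∀ x ∈ a :: t, PySem.Int.mod x 10 ≤ PySem.Int.mod b 10) ∧ ys.length = t.length := by
  induction t generalizing a with
  | nil => exact ⟨[], a, by simp [bubblePass]⟩
  | cons c t ih =>
    by_cases hgt : PySem.Int.mod a 10 > PySem.Int.mod c 10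
    · obtain ⟨ys, b, h1, h2, h3⟩ := ih a
      refine ⟨c :: ys, b, ?_, ?_, by simp [h3]⟩
      · simp only [bubblePass, if_pos hgt, h1]; rfl
      · intro x hx
        rcases List.mem_cons.mp hx with rfl | hx
        · exact h2 x (List.mem_cons_self)
        rcases List.mem_cons.mp hx with rfl | hx
        · exact le_trans (le_of_lt hgt) (h2 a List.mem_cons_self)
        · exact h2 x (List.mem_cons_of_mem a hx)
    · obtain ⟨ys, b, h1, h2, h3⟩ := ih c
      refine ⟨a :: ys, b, ?_, ?_, by simp [h3]⟩
      · simp only [bubblePass, if_neg hgt, h1]; rfl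
      · intro x hx
        rcases List.mem_cons.mp hx with rfl | hx
        · exact le_trans (not_lt.mp hgt) (h2 c List.mem_cons_self)
        · exact h2 x hx

-- a sorted list is a fixed point of the pass (flag stays true)
theorem bubblePass_sorted (l : List Int)
    (h : l.Pairwise (fun a b => PySem.Int.mod a 10 ≤ PySem.Int.mod b 10)) :
    bubblePass l = (l, true) := by
  fun_induction bubblePass l with
  | case1 a b t hgt ih =>
    have := List.rel_of_pairwise_cons h (List.mem_cons_self)
    omega
  | case2 a b t hgt ih =>
    rw [ih h.tail]
  | case3 l h2 => rfl

-- a sorted tail dominated by the head part stays put and does not affect pass or flag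
theorem bubblePass_append_sorted (ys zs : List Int)
    (hzs : zs.Pairwise (fun a b => PySem.Int.mod a 10 ≤ PySem.Int.mod b 10))
    (hcross : ∀ x ∈ ys, ∀ y ∈ zs, PySem.Int.mod x 10 ≤ PySem.Int.mod y 10) :
    bubblePass (ys ++ zs) = ((bubblePass ys).1 ++ zs, (bubblePass ys).2) := by
  fun_induction bubblePass ys with
  | case1 a c t hgt ih =>
    have hac : ∀ x ∈ a :: t, ∀ y ∈ zs, PySem.Int.mod x 10 ≤ PySem.Int.mod y 10 := by
      intro x hx
      rcases List.mem_cons.mp hx with rfl | hx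
      · exact hcross x List.mem_cons_self
      · exact hcross x (List.mem_cons_of_mem _ (List.mem_cons_of_mem _ hx))
    have ih' := ih hac
    rw [List.cons_append] at ih'
    simp only [List.cons_append, bubblePass, if_pos hgt, ih']
  | case2 a c t hgt ih =>
    have hct : ∀ x ∈ c :: t, ∀ y ∈ zs, PySem.Int.mod x 10 ≤ PySem.Int.mod y 10 := by
      intro x hx; exact hcross x (List.mem_cons_of_mem _ hx)
    have ih' := ih hct
    rw [List.cons_append] at ih'
    simp only [List.cons_append, bubblePass, if_neg hgt, ih']
  | case3 ys h2 =>
    rcases ys with _ | ⟨a, _ | ⟨c, t⟩⟩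
    · simpa using bubblePass_sorted zs hzs
    · rcases zs with _ | ⟨y, zs'⟩
      · simp [bubblePass]
      · have hay : ¬ (PySem.Int.mod a 10 > PySem.Int.mod y 10) :=
          not_lt.mpr (hcross a List.mem_cons_self y List.mem_cons_self)
        have hz := bubblePass_sorted (y :: zs') hzs
        simp only [List.cons_append, List.nil_append, bubblePass, if_neg hay, hz]
    · exact (h2 a c t rfl).elim

-- the loop sorts ys ++ zs when zs is already sorted and dominates ys
theorem bubbleLoop_pairwise_aux (n : Nat) (ys zs : List Int)
    (hzs : zs.Pairwise (fun a b => PySem.Int.mod a 10 ≤ PySem.Int.mod b 10))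
    (hcross : ∀ x ∈ ys, ∀ y ∈ zs, PySem.Int.mod x 10 ≤ PySem.Int.mod y 10)
    (hn : ys.length ≤ n) :
    (bubbleLoop n (ys ++ zs)).Pairwise (fun a c => PySem.Int.mod a 10 ≤ PySem.Int.mod c 10) := by
  induction n generalizing ys zs with
  | zero =>
    have : ys = [] := List.eq_nil_of_length_eq_zero (Nat.le_zero.mp hn)
    subst this
    simpa [bubbleLoop] using hzs
  | succ n ih =>
    simp only [bubbleLoop, bubblePass_append_sorted ys zs hzs hcross]
    by_cases hf : (bubblePass ys).2 = true
    · rw [if_pos hf, bubblePass_of_true ys hf]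
      rw [List.pairwise_append]
      exact ⟨pairwise_of_true ys hf, hzs, hcross⟩
    · rw [if_neg hf]
      rcases ys with _ | ⟨a, t⟩
      · simp [bubblePass] at hf
      · obtain ⟨zs', c, h1, h2, h3⟩ := bubblePass_max a t
        rw [h1, List.append_assoc]
        have hmemys : ∀ x, x ∈ zs' ++ [c] → x ∈ a :: t := by
          intro x hx
          exact (bubblePass_perm (a :: t)).mem_iff.mp (by rw [h1]; exact hx)
        refine ih zs' ([c] ++ zs) ?_ ?_ ?_
        · rw [List.pairwise_append]
          refine ⟨List.pairwise_singleton _ _, hzs, ?_⟩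
          intro x hx y hy
          rw [List.mem_singleton.mp hx]
          exact hcross c (hmemys c (List.mem_append_right _ List.mem_cons_self)) y hy
        · intro x hx y hy
          rcases List.mem_append.mp hy with hy | hy
          · rw [List.mem_singleton.mp hy]
            exact h2 x (hmemys x (List.mem_append_left _ hx))
          · exact hcross x (hmemys x (List.mem_append_left _ hx)) y hy
        · simp at hn
          omega

-- after length-many passes (or an early break) the list is sorted by key
theorem bubbleLoop_pairwise (n : Nat) (l : List Int) (hn : l.length ≤ n) :
    (bubbleLoop n l).Pairwise (fun a c => PySem.Int.mod a 10 ≤ PySem.Int.mod c 10) := by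
  have := bubbleLoop_pairwise_aux n l [] (by simp) (by simp) hn
  simpa using this

-- the loop preserves every key class in order (stability)
theorem bubbleLoop_filter (n : Nat) (l : List Int) (k : Int) :
    (bubbleLoop n l).filter (fun x => PySem.Int.mod x 10 == k)
      = l.filter (fun x => PySem.Int.mod x 10 == k) := by
  induction n generalizing l with
  | zero => rfl
  | succ n ih =>
    simp only [bubbleLoop]
    by_cases hf : (bubblePass l).2 = true
    · rw [if_pos hf]
      exact bubblePass_filter l k
    · rw [if_neg hf, ih, bubblePass_filter l k]

-- in a key-sorted list the key-k elements (k minimal among present keys) form the prefix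
theorem filter_takeWhile_aux (k : Int) (m : List Int)
    (hp : m.Pairwise (fun a c => PySem.Int.mod a 10 ≤ PySem.Int.mod c 10))
    (hm : ∀ x ∈ m, PySem.Int.mod x 10 = k ∨ k < PySem.Int.mod x 10) :
    m.filter (fun x => PySem.Int.mod x 10 == k) = m.takeWhile (fun x => PySem.Int.mod x 10 == k)
      ∧ ∀ x ∈ m.dropWhile (fun x => PySem.Int.mod x 10 == k), k < PySem.Int.mod x 10 := by
  induction m with
  | nil => simp
  | cons a m ih =>
    rcases List.pairwise_cons.mp hp with ⟨ha, hpm⟩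
    obtain ⟨ih1, ih2⟩ := ih hpm (fun x hx => hm x (List.mem_cons_of_mem a hx))
    by_cases hak : PySem.Int.mod a 10 = k
    · have hbeq : (PySem.Int.mod a 10 == k) = true := beq_iff_eq.mpr hak
      refine ⟨?_, ?_⟩
      · rw [List.filter_cons, List.takeWhile_cons, hbeq, ih1]
        simp
      · rw [List.dropWhile_cons, hbeq]
        simpa using ih2
    · have hak' : k < PySem.Int.mod a 10 := by
        rcases hm a List.mem_cons_self with h | h
        · exact absurd h hak
        · exact h
      have hbeq : (PySem.Int.mod a 10 == k) = false := beq_eq_false_iff_ne.mpr hak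
      have hnone : ∀ x ∈ m, ¬ (PySem.Int.mod x 10 = k) := by
        intro x hx hxk
        have := ha x hx
        omega
      refine ⟨?_, ?_⟩
      · rw [List.filter_cons, List.takeWhile_cons, hbeq]
        simp only [Bool.false_eq_true, ite_false]
        refine List.filter_eq_nil_iff.mpr ?_
        intro x hx
        simp only [beq_iff_eq]
        exact hnone x hx
      · rw [List.dropWhile_cons, hbeq]
        simp only [Bool.false_eq_true, ite_false]
        intro x hx
        rcases List.mem_cons.mp hx with rfl | hx
        · exact hak'
        · rcases hm x (List.mem_cons_of_mem a hx) with h | h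
          · exact absurd h (hnone x hx)
          · exact h

-- a key-sorted list is the concatenation of its key classes in ascending key order
theorem canonical (ks : List Int) (m : List Int)
    (hp : m.Pairwise (fun a c => PySem.Int.mod a 10 ≤ PySem.Int.mod c 10))
    (hks : ks.Pairwise (· < ·))
    (hmem : ∀ x ∈ m, PySem.Int.mod x 10 ∈ ks) :
    ks.flatMap (fun k => m.filter (fun x => PySem.Int.mod x 10 == k)) = m := by
  induction ks generalizing m with
  | nil =>
    rcases m with _ | ⟨a, m⟩
    · rfl
    · exact absurd (hmem a List.mem_cons_self) (List.not_mem_nil)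
  | cons k ks ih =>
    rcases List.pairwise_cons.mp hks with ⟨hklt, hks'⟩
    have hm : ∀ x ∈ m, PySem.Int.mod x 10 = k ∨ k < PySem.Int.mod x 10 := by
      intro x hx
      rcases List.mem_cons.mp (hmem x hx) with h | h
      · exact Or.inl h
      · exact Or.inr (hklt _ h)
    obtain ⟨h1, h2⟩ := filter_takeWhile_aux k m hp hm
    set m1 := m.takeWhile (fun x => PySem.Int.mod x 10 == k) with hm1
    set m2 := m.dropWhile (fun x => PySem.Int.mod x 10 == k) with hm2
    have hsplit : m = m1 ++ m2 := (List.takeWhile_append_dropWhile).symm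
    have hm2p : m2.Pairwise (fun a c => PySem.Int.mod a 10 ≤ PySem.Int.mod c 10) :=
      hp.sublist (List.dropWhile_sublist _)
    have hm2mem : ∀ x ∈ m2, PySem.Int.mod x 10 ∈ ks := by
      intro x hx
      have hxm : x ∈ m := (List.dropWhile_sublist _).subset hx
      rcases List.mem_cons.mp (hmem x hxm) with h | h
      · exact absurd h (by have := h2 x hx; omega)
      · exact h
    have hfilter_eq : ∀ kk ∈ ks, m.filter (fun x => PySem.Int.mod x 10 == kk)
        = m2.filter (fun x => PySem.Int.mod x 10 == kk) := by
      intro kk hkk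
      rw [hsplit, List.filter_append]
      have : m1.filter (fun x => PySem.Int.mod x 10 == kk) = [] := by
        refine List.filter_eq_nil_iff.mpr ?_
        intro x hx
        rw [hm1] at hx
        have hxk := List.mem_takeWhile_imp hx
        simp only [beq_iff_eq] at hxk ⊢
        have := hklt kk hkk
        omega
      rw [this, List.nil_append]
    simp only [List.flatMap_cons]
    rw [h1, List.flatMap_congr hfilter_eq, ih m2 hm2p hks' hm2mem]
    exact hsplit.symm

-- ===== VERDICT (by name: the statement is the Claim_ definition above) =====
theorem modulo_partition_spec : Claim_equal_modulo_partition := by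
  intro A _
  unfold Spec_modulo_partition modulo_partition modulo_partition_alt
  have hsorted := bubbleLoop_pairwise A.length A le_rfl
  have hmem : ∀ x ∈ bubbleLoop A.length A, PySem.Int.mod x 10 ∈ PySem.List.pyRange 0 10 1 := by
    intro x _
    rw [PySem.List.mem_pyRange_one]
    exact ⟨PySem.Int.mod_nonneg x (by norm_num), PySem.Int.mod_lt x (by norm_num)⟩
  have hks : (PySem.List.pyRange 0 10 1).Pairwise (· < ·) := PySem.List.pairwise_lt_pyRange_one 0 10
  have hc := canonical (PySem.List.pyRange 0 10 1) (bubbleLoop A.length A) hsorted hks hmem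
  rw [← hc]
  exact List.flatMap_congr (fun k _ => bubbleLoop_filter A.length A k)
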